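-- pv_equiv track=rewrite | github.com/vamseeachanta/assetutilities | src/assetutilities/agent_os/commands/template_management.py | infer_agent_type
-- ===== SOURCE A (Python) =====
-- from typing import List, Dict, Any, Optional, Union
--
-- def infer_agent_type(module_context: Dict[str, Any]) -> str:
--     """Infer agent type from module context.
--
--     Args:
--         module_context: Context information
--
--     Returns:
--         Inferred agent type
--     """
--     # Check for engineering indicators
--     engineering_indicators = [
--         "has_code_files", "has_tests", "has_api", "language",
--         "framework", "database", "deployment"
--     ]
--
--     analysis_indicators = [
--         "has_data_files", "visualization", "statistics", "machine_learning",
--         "data_processing", "jupyter_notebooks"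
--     ]
--
--     documentation_indicators = [
--         "has_docs", "markdown_files", "api_documentation", "user_guides",
--         "tutorials", "wiki"
--     ]
--
--     infrastructure_indicators = [
--         "docker", "kubernetes", "ci_cd", "deployment", "monitoring",
--         "infrastructure_as_code", "cloud_provider"
--     ]
--
--     # Score each category
--     scores = {
--         "engineering": sum(1 for indicator in engineering_indicators if module_context.get(indicator)),
--         "analysis": sum(1 for indicator in analysis_indicators if module_context.get(indicator)),
--         "documentation": sum(1 for indicator in documentation_indicators if module_context.get(indicator)),
--         "infrastructure": sum(1 for indicator in infrastructure_indicators if module_context.get(indicator))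
--     }
--
--     # Return category with highest score, or general if tied
--     if max(scores.values()) == 0:
--         return "general-purpose"
--
--     return max(scores.items(), key=lambda x: x[1])[0]
-- ===== SOURCE B (Python) =====
-- INDEX = {
--     "has_code_files": ("engineering",),
--     "has_tests": ("engineering",),
--     "has_api": ("engineering",),
--     "language": ("engineering",),
--     "framework": ("engineering",),
--     "database": ("engineering",),
--     "deployment": ("engineering", "infrastructure"),
--     "has_data_files": ("analysis",),
--     "visualization": ("analysis",),
--     "statistics": ("analysis",),
--     "machine_learning": ("analysis",),
--     "data_processing": ("analysis",),
--     "jupyter_notebooks": ("analysis",),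
--     "has_docs": ("documentation",),
--     "markdown_files": ("documentation",),
--     "api_documentation": ("documentation",),
--     "user_guides": ("documentation",),
--     "tutorials": ("documentation",),
--     "wiki": ("documentation",),
--     "docker": ("infrastructure",),
--     "kubernetes": ("infrastructure",),
--     "ci_cd": ("infrastructure",),
--     "monitoring": ("infrastructure",),
--     "infrastructure_as_code": ("infrastructure",),
--     "cloud_provider": ("infrastructure",),
-- }
--
--
-- def infer_agent_type(module_context):
--     """Infer agent type from module context (single pass over the context
--     through an inverted indicator->categories index)."""
--     scores = {"engineering": 0, "analysis": 0, "documentation": 0,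
--               "infrastructure": 0}
--     for key, value in module_context.items():
--         if value:
--             for cat in INDEX.get(key, ()):
--                 scores[cat] += 1
--     if max(scores.values()) == 0:
--         return "general-purpose"
--     return max(scores.items(), key=lambda x: x[1])[0]
-- ===== Notes on version B (the rewrite author's own statement) =====
-- stated objective: alternative
-- what changed: Replaces the four per-category scans of the context (one get() per indicator) with one inverted indicator->categories index consulted in a single pass over module_context.items(); 'deployment' maps to both engineering and infrastructure.
import Mathlib
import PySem

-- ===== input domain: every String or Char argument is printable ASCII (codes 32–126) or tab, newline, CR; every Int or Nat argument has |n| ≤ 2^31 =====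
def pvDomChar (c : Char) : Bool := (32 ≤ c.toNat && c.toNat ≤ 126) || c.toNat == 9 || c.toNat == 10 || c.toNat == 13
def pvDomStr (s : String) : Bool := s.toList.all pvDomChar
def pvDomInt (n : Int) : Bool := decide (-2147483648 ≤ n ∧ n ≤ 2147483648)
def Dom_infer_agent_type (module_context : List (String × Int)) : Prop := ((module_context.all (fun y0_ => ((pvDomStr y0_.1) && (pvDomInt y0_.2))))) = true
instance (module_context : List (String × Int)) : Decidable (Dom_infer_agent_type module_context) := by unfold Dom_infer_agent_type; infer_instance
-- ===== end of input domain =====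

-- B replaces A's four per-category scans by one inverted indicator->categories
-- index and a single pass over the context entries (alternative decomposition).

-- ===== PORT A =====
-- module_context.get(indicator) truthiness: first match in the assoc list, nonzero value
def pvGetTruthy (m : List (String × Int)) (k : String) : Bool :=
  match m.find? (fun p => p.1 == k) with
  | some p => p.2 != 0
  | none => false

-- sum(1 for indicator in inds if module_context.get(indicator))
def pvCount (m : List (String × Int)) (inds : List String) : Int :=
  inds.foldl (fun acc i => if pvGetTruthy m i then acc + 1 else acc) 0

def pvEng : List String :=
  ["has_code_files", "has_tests", "has_api", "language", "framework", "database", "deployment"]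
def pvAna : List String :=
  ["has_data_files", "visualization", "statistics", "machine_learning", "data_processing", "jupyter_notebooks"]
def pvDoc : List String :=
  ["has_docs", "markdown_files", "api_documentation", "user_guides", "tutorials", "wiki"]
def pvInf : List String :=
  ["docker", "kubernetes", "ci_cd", "deployment", "monitoring", "infrastructure_as_code", "cloud_provider"]

-- Python max over a nonempty list of ints (both versions call it on scores.values())
def pvMaxVal : List Int → Int
  | [] => 0
  | h :: t => t.foldl max h

-- Python max(items, key=lambda x: x[1]): first item with maximal value
def pvArgmax : List (String × Int) → String
  | [] => ""
  | h :: t => (t.foldl (fun b p => if p.2 > b.2 then p else b) h).1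

def infer_agent_type (module_context : List (String × Int)) : String :=
  let scores : List (String × Int) :=
    [("engineering", pvCount module_context pvEng),
     ("analysis", pvCount module_context pvAna),
     ("documentation", pvCount module_context pvDoc),
     ("infrastructure", pvCount module_context pvInf)]
  if pvMaxVal (scores.map Prod.snd) = 0 then "general-purpose"
  else pvArgmax scores

-- ===== PORT B =====
-- the inverted index INDEX of Source B
def pvIndex : List (String × List String) :=
  [("has_code_files", ["engineering"]), ("has_tests", ["engineering"]),
   ("has_api", ["engineering"]), ("language", ["engineering"]),
   ("framework", ["engineering"]), ("database", ["engineering"]),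
   ("deployment", ["engineering", "infrastructure"]),
   ("has_data_files", ["analysis"]), ("visualization", ["analysis"]),
   ("statistics", ["analysis"]), ("machine_learning", ["analysis"]),
   ("data_processing", ["analysis"]), ("jupyter_notebooks", ["analysis"]),
   ("has_docs", ["documentation"]), ("markdown_files", ["documentation"]),
   ("api_documentation", ["documentation"]), ("user_guides", ["documentation"]),
   ("tutorials", ["documentation"]), ("wiki", ["documentation"]),
   ("docker", ["infrastructure"]), ("kubernetes", ["infrastructure"]),
   ("ci_cd", ["infrastructure"]), ("monitoring", ["infrastructure"]),
   ("infrastructure_as_code", ["infrastructure"]), ("cloud_provider", ["infrastructure"])]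

-- INDEX.get(key, ())
def pvCatsOf (k : String) : List String :=
  match pvIndex.find? (fun p => p.1 == k) with
  | some p => p.2
  | none => []

-- scores[cat] += 1
def pvBump (sc : List (String × Int)) (c : String) : List (String × Int) :=
  sc.map (fun p => if p.1 == c then (p.1, p.2 + 1) else p)

-- the body of the 'for key, value in module_context.items()' loop
def pvStep (sc : List (String × Int)) (kv : String × Int) : List (String × Int) :=
  if kv.2 != 0 then (pvCatsOf kv.1).foldl pvBump sc else sc

def infer_agent_type_alt (module_context : List (String × Int)) : String :=
  let scores := module_context.foldl pvStep
    [("engineering", 0), ("analysis", 0), ("documentation", 0), ("infrastructure", 0)]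
  if pvMaxVal (scores.map Prod.snd) = 0 then "general-purpose"
  else pvArgmax scores

-- ===== PRECONDITION & SPEC =====
-- Pre_ excludes association lists with duplicate keys: they do not represent a
-- Python dict (A's per-indicator get() uses only the first binding while B's
-- single pass visits every entry), and no dict input ever produces them.
def Pre_infer_agent_type (module_context : List (String × Int)) : Prop :=
  (module_context.map Prod.fst).Nodup
instance (module_context : List (String × Int)) : Decidable (Pre_infer_agent_type module_context) := by unfold Pre_infer_agent_type; infer_instance

def pvWitness_infer_agent_type : (List (String × Int)) :=
  [("has_api", 1), ("docker", 0), ("deployment", 2)]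

def Spec_infer_agent_type (module_context : List (String × Int)) (out : String) : Prop := out = infer_agent_type_alt module_context
instance (module_context : List (String × Int)) (out : String) : Decidable (Spec_infer_agent_type module_context out) := by unfold Spec_infer_agent_type; infer_instance

-- ===== CLAIM (what is proved, stated in full; the proofs are below) =====
def Claim_equal_infer_agent_type : Prop := ∀ (module_context : List (String × Int)), Dom_infer_agent_type module_context → Pre_infer_agent_type module_context → Spec_infer_agent_type module_context (infer_agent_type module_context)

-- ===== LEMMAS AND PROOFS =====

-- per-entry contribution of B's loop, by category
def pvT (c : String) : List (String × Int) → Int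
  | [] => 0
  | (k, v) :: r => (if v ≠ 0 then ((pvCatsOf k).count c : Int) else 0) + pvT c r

-- per-entry contribution computed against an indicator list
def pvS (inds : List String) : List (String × Int) → Int
  | [] => 0
  | (k, v) :: r => (if v ≠ 0 then (inds.count k : Int) else 0) + pvS inds r

lemma transpose (k : String) :
    (pvCatsOf k).count "engineering" = pvEng.count k ∧
    (pvCatsOf k).count "analysis" = pvAna.count k ∧
    (pvCatsOf k).count "documentation" = pvDoc.count k ∧
    (pvCatsOf k).count "infrastructure" = pvInf.count k := by
  by_cases h0 : k = "has_code_files"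
  · subst h0; decide
  by_cases h1 : k = "has_tests"
  · subst h1; decide
  by_cases h2 : k = "has_api"
  · subst h2; decide
  by_cases h3 : k = "language"
  · subst h3; decide
  by_cases h4 : k = "framework"
  · subst h4; decide
  by_cases h5 : k = "database"
  · subst h5; decide
  by_cases h6 : k = "deployment"
  · subst h6; decide
  by_cases h7 : k = "has_data_files"
  · subst h7; decide
  by_cases h8 : k = "visualization"
  · subst h8; decide
  by_cases h9 : k = "statistics"
  · subst h9; decide
  by_cases h10 : k = "machine_learning"
  · subst h10; decide
  by_cases h11 : k = "data_processing"
  · subst h11; decide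
  by_cases h12 : k = "jupyter_notebooks"
  · subst h12; decide
  by_cases h13 : k = "has_docs"
  · subst h13; decide
  by_cases h14 : k = "markdown_files"
  · subst h14; decide
  by_cases h15 : k = "api_documentation"
  · subst h15; decide
  by_cases h16 : k = "user_guides"
  · subst h16; decide
  by_cases h17 : k = "tutorials"
  · subst h17; decide
  by_cases h18 : k = "wiki"
  · subst h18; decide
  by_cases h19 : k = "docker"
  · subst h19; decide
  by_cases h20 : k = "kubernetes"
  · subst h20; decide
  by_cases h21 : k = "ci_cd"
  · subst h21; decide
  by_cases h22 : k = "monitoring"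
  · subst h22; decide
  by_cases h23 : k = "infrastructure_as_code"
  · subst h23; decide
  by_cases h24 : k = "cloud_provider"
  · subst h24; decide
  have hc : pvCatsOf k = [] := by
    simp only [pvCatsOf, pvIndex]
    rw [List.find?_eq_none.mpr ?_]
    intro p hp
    fin_cases hp
    · exact fun e => h0 (beq_iff_eq.mp e).symm
    · exact fun e => h1 (beq_iff_eq.mp e).symm
    · exact fun e => h2 (beq_iff_eq.mp e).symm
    · exact fun e => h3 (beq_iff_eq.mp e).symm
    · exact fun e => h4 (beq_iff_eq.mp e).symm
    · exact fun e => h5 (beq_iff_eq.mp e).symm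
    · exact fun e => h6 (beq_iff_eq.mp e).symm
    · exact fun e => h7 (beq_iff_eq.mp e).symm
    · exact fun e => h8 (beq_iff_eq.mp e).symm
    · exact fun e => h9 (beq_iff_eq.mp e).symm
    · exact fun e => h10 (beq_iff_eq.mp e).symm
    · exact fun e => h11 (beq_iff_eq.mp e).symm
    · exact fun e => h12 (beq_iff_eq.mp e).symm
    · exact fun e => h13 (beq_iff_eq.mp e).symm
    · exact fun e => h14 (beq_iff_eq.mp e).symm
    · exact fun e => h15 (beq_iff_eq.mp e).symm
    · exact fun e => h16 (beq_iff_eq.mp e).symm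
    · exact fun e => h17 (beq_iff_eq.mp e).symm
    · exact fun e => h18 (beq_iff_eq.mp e).symm
    · exact fun e => h19 (beq_iff_eq.mp e).symm
    · exact fun e => h20 (beq_iff_eq.mp e).symm
    · exact fun e => h21 (beq_iff_eq.mp e).symm
    · exact fun e => h22 (beq_iff_eq.mp e).symm
    · exact fun e => h23 (beq_iff_eq.mp e).symm
    · exact fun e => h24 (beq_iff_eq.mp e).symm
  have g0 : ¬ "has_code_files" = k := fun e => h0 e.symm
  have g1 : ¬ "has_tests" = k := fun e => h1 e.symm
  have g2 : ¬ "has_api" = k := fun e => h2 e.symm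
  have g3 : ¬ "language" = k := fun e => h3 e.symm
  have g4 : ¬ "framework" = k := fun e => h4 e.symm
  have g5 : ¬ "database" = k := fun e => h5 e.symm
  have g6 : ¬ "deployment" = k := fun e => h6 e.symm
  have g7 : ¬ "has_data_files" = k := fun e => h7 e.symm
  have g8 : ¬ "visualization" = k := fun e => h8 e.symm
  have g9 : ¬ "statistics" = k := fun e => h9 e.symm
  have g10 : ¬ "machine_learning" = k := fun e => h10 e.symm
  have g11 : ¬ "data_processing" = k := fun e => h11 e.symm
  have g12 : ¬ "jupyter_notebooks" = k := fun e => h12 e.symm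
  have g13 : ¬ "has_docs" = k := fun e => h13 e.symm
  have g14 : ¬ "markdown_files" = k := fun e => h14 e.symm
  have g15 : ¬ "api_documentation" = k := fun e => h15 e.symm
  have g16 : ¬ "user_guides" = k := fun e => h16 e.symm
  have g17 : ¬ "tutorials" = k := fun e => h17 e.symm
  have g18 : ¬ "wiki" = k := fun e => h18 e.symm
  have g19 : ¬ "docker" = k := fun e => h19 e.symm
  have g20 : ¬ "kubernetes" = k := fun e => h20 e.symm
  have g21 : ¬ "ci_cd" = k := fun e => h21 e.symm
  have g22 : ¬ "monitoring" = k := fun e => h22 e.symm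
  have g23 : ¬ "infrastructure_as_code" = k := fun e => h23 e.symm
  have g24 : ¬ "cloud_provider" = k := fun e => h24 e.symm
  rw [hc]
  refine ⟨?_, ?_, ?_, ?_⟩ <;>
    simp [pvEng, pvAna, pvDoc, pvInf, List.count_cons, h0, h1, h2, h3, h4, h5, h6, h7, h8, h9, h10, h11, h12, h13, h14, h15, h16, h17, h18, h19, h20, h21, h22, h23, h24, g0, g1, g2, g3, g4, g5, g6, g7, g8, g9, g10, g11, g12, g13, g14, g15, g16, g17, g18, g19, g20, g21, g22, g23, g24]
lemma bump_fold : ∀ (cats : List String) (x1 x2 x3 x4 : Int),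
    cats.foldl pvBump
      [("engineering", x1), ("analysis", x2), ("documentation", x3), ("infrastructure", x4)] =
      [("engineering", x1 + cats.count "engineering"),
       ("analysis", x2 + cats.count "analysis"),
       ("documentation", x3 + cats.count "documentation"),
       ("infrastructure", x4 + cats.count "infrastructure")] := by
  intro cats
  induction cats with
  | nil => simp
  | cons c t ih =>
    intro x1 x2 x3 x4
    rw [List.foldl_cons]
    simp only [pvBump, List.map, ih, List.count_cons]
    split_ifs <;> simp_all <;> push_cast <;> omega
lemma foldl_step (m : List (String × Int)) : ∀ (x1 x2 x3 x4 : Int),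
    m.foldl pvStep
      [("engineering", x1), ("analysis", x2), ("documentation", x3), ("infrastructure", x4)] =
      [("engineering", x1 + pvT "engineering" m),
       ("analysis", x2 + pvT "analysis" m),
       ("documentation", x3 + pvT "documentation" m),
       ("infrastructure", x4 + pvT "infrastructure" m)] := by
  induction m with
  | nil => simp [pvT]
  | cons p r ih =>
    obtain ⟨k, v⟩ := p
    intro x1 x2 x3 x4
    rw [List.foldl_cons]
    by_cases hv : v = 0
    · simp [pvStep, hv, pvT, ih]
    · have hb : (v != 0) = true := by simpa using hv
      simp only [pvStep, hb, if_true, bump_fold, ih, pvT, hv, ne_eq, not_false_iff]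
      simp [hv]
      omega
lemma count_aux (m : List (String × Int)) : ∀ (inds : List String) (acc : Int),
    inds.foldl (fun a i => if pvGetTruthy m i then a + 1 else a) acc =
      acc + ((inds.filter (pvGetTruthy m)).length : Int) := by
  intro inds
  induction inds with
  | nil => simp
  | cons i t ih =>
    intro acc
    by_cases h : pvGetTruthy m i = true <;> simp [List.foldl_cons, List.filter_cons, h, ih] <;> push_cast <;> ring
lemma truthy_not_mem (k : String) (r : List (String × Int)) (h : k ∉ r.map Prod.fst) :
    pvGetTruthy r k = false := by
  induction r with
  | nil => rfl
  | cons p t ih =>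
    simp only [List.map_cons, List.mem_cons, not_or] at h
    simp only [pvGetTruthy, List.find?]
    have : (p.1 == k) = false := beq_eq_false_iff_ne.mpr (fun e => h.1 e.symm)
    rw [this]
    exact ih h.2
lemma truthy_cons (k i : String) (v : Int) (r : List (String × Int)) :
    pvGetTruthy ((k, v) :: r) i = if k == i then (v != 0) else pvGetTruthy r i := by
  simp only [pvGetTruthy, List.find?]
  by_cases h : (k == i) = true <;> simp [h]

lemma filter_cons_len (k : String) (v : Int) (r : List (String × Int))
    (h : k ∉ r.map Prod.fst) : ∀ inds : List String,
    (inds.filter (pvGetTruthy ((k, v) :: r))).length =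
      (if v ≠ 0 then inds.count k else 0) + (inds.filter (pvGetTruthy r)).length := by
  intro inds
  induction inds with
  | nil => simp
  | cons i t ih =>
    rw [List.filter_cons, List.filter_cons, truthy_cons]
    by_cases hk : k = i
    · subst hk
      rw [truthy_not_mem k r h, BEq.rfl, if_pos rfl, List.count_cons_self]
      by_cases hv : v = 0
      · subst hv; simp [ih]
      · have hb : (v != 0) = true := by simpa using hv
        simp [hb, hv, ih]
        omega
    · have hb : (k == i) = false := beq_eq_false_iff_ne.mpr hk
      rw [hb]
      have hne : ¬ i = k := fun e => hk e.symm
      have hc : (i :: t).count k = t.count k := by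
        simp [List.count_cons, hne]
      by_cases ht : pvGetTruthy r i = true
      · simp [ht, hc, ih]; omega
      · simp only [Bool.not_eq_true] at ht
        simp [ht, hc, ih]
lemma count_eq_S (m : List (String × Int)) (h : (m.map Prod.fst).Nodup) (inds : List String) :
    pvCount m inds = pvS inds m := by
  induction m generalizing inds with
  | nil =>
    rw [pvCount, count_aux]
    have : inds.filter (pvGetTruthy []) = [] := by
      simp [pvGetTruthy, List.filter_eq_nil_iff]
    simp [this, pvS]
  | cons p r ih =>
    obtain ⟨k, v⟩ := p
    simp only [List.map_cons, List.nodup_cons] at h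
    rw [pvCount, count_aux, pvS, filter_cons_len k v r h.1 inds, ← ih h.2 inds,
      pvCount, count_aux]
    push_cast
    split_ifs <;> ring
lemma T_eq_S (m : List (String × Int)) :
    pvT "engineering" m = pvS pvEng m ∧ pvT "analysis" m = pvS pvAna m ∧
    pvT "documentation" m = pvS pvDoc m ∧ pvT "infrastructure" m = pvS pvInf m := by
  induction m with
  | nil => exact ⟨rfl, rfl, rfl, rfl⟩
  | cons p r ih =>
    obtain ⟨k, v⟩ := p
    obtain ⟨e1, e2, e3, e4⟩ := ih
    obtain ⟨c1, c2, c3, c4⟩ := transpose k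
    refine ⟨?_, ?_, ?_, ?_⟩ <;> simp [pvT, pvS, e1, e2, e3, e4, c1, c2, c3, c4]
-- ===== VERDICT (by name: the statement is the Claim_ definition above) =====
theorem infer_agent_type_spec : Claim_equal_infer_agent_type := by
  intro m _ pre
  show infer_agent_type m = infer_agent_type_alt m
  unfold infer_agent_type infer_agent_type_alt
  rw [foldl_step]
  obtain ⟨t1, t2, t3, t4⟩ := T_eq_S m
  rw [t1, t2, t3, t4, ← count_eq_S m pre, ← count_eq_S m pre, ← count_eq_S m pre,
      ← count_eq_S m pre]
  norm_num
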